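-- pv_equiv track=rewrite | github.com/msellamiTN/mapr-cluster-ansible | playbooks/library/cluster_audit.py | get_limit_for_user
-- ===== SOURCE A (Python) =====
-- def get_limit_for_user(user, data, prop):
--     res = filter(lambda aline: aline[0] == user, data)
--     res = [line[3] for line in res if line[2] == prop]
--     try:
--         res = res[-1]
--     except Exception:
--         raise MaprException("Property {0} not found for user {1}".format(
--             prop, user))
--     return res
--
-- class MaprException(Exception):
--     pass
-- ===== SOURCE B (Python) =====
-- def get_limit_for_user(user, data, prop):
--     # reverse scan with early exit: return the last matching limit directly
--     for line in reversed(data):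
--         if line[0] == user and line[2] == prop:
--             return line[3]
--     raise MaprException("Property {0} not found for user {1}".format(prop, user))
--
-- class MaprException(Exception):
--     pass
-- ===== Notes on version B (the rewrite author's own statement) =====
-- stated objective: simpler
-- what changed: Instead of building the full filtered list of matching limits and indexing its last element, B walks the data backwards and returns the first match, raising only if the scan completes.
import Mathlib
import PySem

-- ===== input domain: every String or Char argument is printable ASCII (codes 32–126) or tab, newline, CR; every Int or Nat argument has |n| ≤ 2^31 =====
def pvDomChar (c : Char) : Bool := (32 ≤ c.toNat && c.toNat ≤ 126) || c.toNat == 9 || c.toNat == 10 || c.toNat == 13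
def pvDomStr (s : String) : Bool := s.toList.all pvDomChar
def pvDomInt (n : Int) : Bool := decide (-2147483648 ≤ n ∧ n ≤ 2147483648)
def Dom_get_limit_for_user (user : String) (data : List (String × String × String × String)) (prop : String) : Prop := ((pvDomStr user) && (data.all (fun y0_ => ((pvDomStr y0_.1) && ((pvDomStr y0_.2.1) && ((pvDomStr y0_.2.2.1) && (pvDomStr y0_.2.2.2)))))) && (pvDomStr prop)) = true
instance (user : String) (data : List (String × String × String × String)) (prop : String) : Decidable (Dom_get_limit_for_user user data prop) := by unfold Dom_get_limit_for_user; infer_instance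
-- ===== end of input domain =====

-- B replaces "filter twice, map, take last element" by a reverse scan returning the
-- first match; equivalence is proved on inputs containing a matching line (Pre_),
-- since A raises MaprException when there is none (and B raises there too).

-- ===== PORT A =====
-- res = filter(lambda aline: aline[0] == user, data)
-- res = [line[3] for line in res if line[2] == prop]
-- res = res[-1]  (IndexError → MaprException when empty; Pre_ excludes that)
def get_limit_for_user (user : String) (data : List (String × String × String × String)) (prop : String) : String :=
  let res := data.filter (fun aline => aline.1 == user)
  let res2 := (res.filter (fun line => line.2.2.1 == prop)).map (fun line => line.2.2.2)
  (res2.getLast?).getD ""   -- none only when res2 = [], excluded by Pre_ (Python raises)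

-- ===== PORT B =====
-- for line in reversed(data): if match: return line[3];  raise at the end (excluded by Pre_)
def pvScanRev (user propName : String) : List (String × String × String × String) → String
  | [] => ""   -- Python B raises here; excluded by Pre_
  | line :: rest =>
      if line.1 == user && line.2.2.1 == propName then line.2.2.2
      else pvScanRev user propName rest

def get_limit_for_user_alt (user : String) (data : List (String × String × String × String)) (prop : String) : String :=
  pvScanRev user prop data.reverse

-- ===== PRECONDITION & SPEC =====
-- Pre_ : some line matches both user and prop; otherwise the Python A (and B) raise MaprException.
def Pre_get_limit_for_user (user : String) (data : List (String × String × String × String)) (prop : String) : Prop :=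
  ∃ line ∈ data, line.1 = user ∧ line.2.2.1 = prop
instance (user : String) (data : List (String × String × String × String)) (prop : String) : Decidable (Pre_get_limit_for_user user data prop) := by unfold Pre_get_limit_for_user; infer_instance

def pvWitness_get_limit_for_user : String × (List (String × String × String × String)) × String :=
  ("u", [("u", "hard", "nofile", "100")], "nofile")

def Spec_get_limit_for_user (user : String) (data : List (String × String × String × String)) (prop : String) (out : String) : Prop := out = get_limit_for_user_alt user data prop
instance (user : String) (data : List (String × String × String × String)) (prop : String) (out : String) : Decidable (Spec_get_limit_for_user user data prop out) := by unfold Spec_get_limit_for_user; infer_instance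

-- ===== CLAIM (what is proved, stated in full; the proofs are below) =====
def Claim_equal_get_limit_for_user : Prop := ∀ (user : String) (data : List (String × String × String × String)) (prop : String), Dom_get_limit_for_user user data prop → Pre_get_limit_for_user user data prop → Spec_get_limit_for_user user data prop (get_limit_for_user user data prop)

-- ===== LEMMAS AND PROOFS =====

-- B's reverse scan on a list L is the head of the filtered-and-mapped L (or "").
theorem pvScanRev_eq (user propName : String) (L : List (String × String × String × String)) :
    pvScanRev user propName L =
      (((L.filter (fun l => l.1 == user && l.2.2.1 == propName)).map (fun l => l.2.2.2)).head?).getD "" := by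
  induction L with
  | nil => rfl
  | cons l rest ih =>
      simp only [pvScanRev, List.filter_cons]
      by_cases h : (l.1 == user && l.2.2.1 == propName) = true
      · simp [h]
      · simp [h, ih]

theorem get_limit_for_user_spec : Claim_equal_get_limit_for_user := by
  intro user data prop _ _
  unfold Spec_get_limit_for_user get_limit_for_user get_limit_for_user_alt
  rw [pvScanRev_eq]
  simp only [List.filter_reverse, List.map_reverse, List.head?_reverse, List.filter_filter]
  have hp : (fun (a : String × String × String × String) => a.2.2.1 == prop && a.1 == user)
      = (fun a => a.1 == user && a.2.2.1 == prop) := by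
    funext a; exact Bool.and_comm ..
  rw [hp]
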